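-- pv_equiv track=rewrite | github.com/wwyyww/algorithm | Programmers/etc/최소직사각형.py | solution
-- ===== SOURCE A (Python) =====
-- def solution(sizes):
--     max_w = 0
--     max_h = 0
--
--     for size in sizes:
--         if size[0] < size[1]:
--             size[0], size[1] = size[1], size[0]
--         max_w = max(max_w, size[0])
--         max_h = max(max_h, size[1])
--
--     return max_w*max_h
-- ===== SOURCE B (Python) =====
-- def solution(sizes):
--     # Divide and conquer: the wallet dims of a group of cards is the componentwise
--     # max (merge) of the wallet dims of its two halves; the empty wallet is (0, 0).
--     def merge(p, q):
--         return (max(p[0], q[0]), max(p[1], q[1]))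
--
--     def dims(cards):
--         if len(cards) == 0:
--             return (0, 0)
--         if len(cards) == 1:
--             a, b = cards[0][0], cards[0][1]
--             return (a, b) if a >= b else (b, a)
--         mid = len(cards) // 2
--         return merge(dims(cards[:mid]), dims(cards[mid:]))
--
--     w, h = merge((0, 0), dims(sizes))
--     return w * h
-- ===== Notes on version B (the rewrite author's own statement) =====
-- stated objective: alternative
-- what changed: Replaces A's single left-to-right loop with running maxima (and in-place swap) by a recursive divide-and-conquer: split the card list in halves, compute each half's wallet dims, and merge them with a componentwise max, seeding with the empty wallet (0,0); return-value equal, but B does not mutate sizes.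
import Mathlib
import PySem

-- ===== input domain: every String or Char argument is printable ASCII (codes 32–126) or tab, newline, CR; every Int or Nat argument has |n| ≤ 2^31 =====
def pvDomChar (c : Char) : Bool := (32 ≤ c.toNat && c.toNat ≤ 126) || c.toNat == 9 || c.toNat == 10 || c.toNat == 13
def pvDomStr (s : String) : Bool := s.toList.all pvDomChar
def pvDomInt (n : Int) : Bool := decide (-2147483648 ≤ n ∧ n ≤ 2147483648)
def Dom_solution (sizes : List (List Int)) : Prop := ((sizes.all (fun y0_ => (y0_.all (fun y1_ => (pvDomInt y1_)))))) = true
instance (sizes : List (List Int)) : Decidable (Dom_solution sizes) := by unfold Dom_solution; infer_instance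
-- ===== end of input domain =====

-- B replaces A's fused loop (in-place swap + running maxima) by divide-and-conquer merged
-- with componentwise max; return-value equivalence only (A mutates sizes in Python, B does not).

-- ===== PORT A =====
-- A's fused loop: conditionally swap size[0]/size[1], then update both running maxima.
def solution (sizes : List (List Int)) : Int :=
  let st := sizes.foldl (fun (acc : Int × Int) size =>
    let a := (PySem.List.pyGet? size 0).getD 0
    let b := (PySem.List.pyGet? size 1).getD 0
    let p := if a < b then (b, a) else (a, b)
    (max acc.1 p.1, max acc.2 p.2)) (0, 0)
  st.1 * st.2

-- ===== PORT B =====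
-- merge(p, q) of Source B
def pvMerge (p q : Int × Int) : Int × Int := (max p.1 q.1, max p.2 q.2)

-- dims(cards) of Source B; cards[:mid] / cards[mid:] with 0 ≤ mid ≤ len(cards) are exactly
-- List.take mid / List.drop mid (nonnegative in-range Python slices).
def pvDims (cards : List (List Int)) : Int × Int :=
  if _h0 : cards.length = 0 then (0, 0)
  else if _h1 : cards.length = 1 then
    let a := (PySem.List.pyGet? ((PySem.List.pyGet? cards 0).getD []) 0).getD 0
    let b := (PySem.List.pyGet? ((PySem.List.pyGet? cards 0).getD []) 1).getD 0
    if a ≥ b then (a, b) else (b, a)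
  else
    let mid := cards.length / 2
    pvMerge (pvDims (cards.take mid)) (pvDims (cards.drop mid))
termination_by cards.length
decreasing_by
  · simp only [List.length_take]; omega
  · simp only [List.length_drop]; omega

def solution_alt (sizes : List (List Int)) : Int :=
  let wh := pvMerge (0, 0) (pvDims sizes)
  wh.1 * wh.2

-- ===== PRECONDITION & SPEC =====
-- Pre_ excludes cards with fewer than two entries, on which A raises IndexError.
def Pre_solution (sizes : List (List Int)) : Prop := ∀ s ∈ sizes, 2 ≤ s.length
instance (sizes : List (List Int)) : Decidable (Pre_solution sizes) := by unfold Pre_solution; infer_instance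
def pvWitness_solution : List (List Int) := [[3, 7], [5, 2]]

def Spec_solution (sizes : List (List Int)) (out : Int) : Prop := out = solution_alt sizes
instance (sizes : List (List Int)) (out : Int) : Decidable (Spec_solution sizes out) := by unfold Spec_solution; infer_instance

-- ===== CLAIM (what is proved, stated in full; the proofs are below) =====
def Claim_equal_solution : Prop := ∀ (sizes : List (List Int)), Dom_solution sizes → Pre_solution sizes → Spec_solution sizes (solution sizes)

-- ===== LEMMAS AND PROOFS =====

-- A's loop step
def pvStepA (acc : Int × Int) (size : List Int) : Int × Int :=
  let a := (PySem.List.pyGet? size 0).getD 0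
  let b := (PySem.List.pyGet? size 1).getD 0
  let p := if a < b then (b, a) else (a, b)
  (max acc.1 p.1, max acc.2 p.2)

theorem stepA_fold_nonneg (l : List (List Int)) :
    ∀ w h : Int, 0 ≤ w → 0 ≤ h →
      0 ≤ (l.foldl pvStepA (w, h)).1 ∧ 0 ≤ (l.foldl pvStepA (w, h)).2 := by
  induction l with
  | nil => intro w h hw hh; exact ⟨hw, hh⟩
  | cons c t ih =>
    intro w h hw hh
    simp only [List.foldl_cons]
    exact ih _ _ (le_trans hw (le_max_left _ _)) (le_trans hh (le_max_left _ _))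

-- merging an accumulator with dims is A's fold over the same cards
theorem merge_dims_eq_fold (cards : List (List Int)) :
    ∀ w h : Int, 0 ≤ w → 0 ≤ h →
      pvMerge (w, h) (pvDims cards) = cards.foldl pvStepA (w, h) := by
  induction hn : cards.length using Nat.strong_induction_on generalizing cards with
  | _ n ih =>
    intro w h hw hh
    match cards, hn with
    | [], _ =>
      rw [pvDims]
      simp only [List.length_nil, dite_true, List.foldl_nil, pvMerge]
      rw [max_eq_left hw, max_eq_left hh]
    | [c], _ =>
      rw [pvDims]
      have hc0 : (PySem.List.pyGet? [c] 0).getD ([] : List Int) = c := by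
        rw [PySem.List.pyGet?_zero_cons]; rfl
      simp only [List.length_cons, List.length_nil, hc0, List.foldl_cons, List.foldl_nil]
      norm_num [pvMerge, pvStepA]
      generalize (PySem.List.pyGet? c 0).getD 0 = a
      generalize (PySem.List.pyGet? c 1).getD 0 = b
      constructor <;> (split <;> split <;> first | rfl | omega)
    | c1 :: c2 :: t, hn =>
      rw [pvDims]
      have h0 : ¬ (c1 :: c2 :: t).length = 0 := by simp
      have h1 : ¬ (c1 :: c2 :: t).length = 1 := by simp
      simp only [h0, h1, dite_false]
      set cs := c1 :: c2 :: t with hcs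
      set mid := cs.length / 2 with hmid
      have hlt : mid < cs.length := by simp [hcs] at *; omega
      have hpos : 1 ≤ mid := by simp [hcs] at *; omega
      have hassoc : ∀ (x d1 d2 : Int × Int), pvMerge x (pvMerge d1 d2) = pvMerge (pvMerge x d1) d2 := by
        intro x d1 d2; simp [pvMerge, max_assoc]
      rw [hassoc]
      have ht : (cs.take mid).length < n := by simp [List.length_take]; omega
      have hd : (cs.drop mid).length < n := by simp [List.length_drop]; omega
      rw [ih _ ht _ rfl w h hw hh]
      have hnn := stepA_fold_nonneg (cs.take mid) w h hw hh
      have := ih _ hd _ rfl ((cs.take mid).foldl pvStepA (w, h)).1 ((cs.take mid).foldl pvStepA (w, h)).2 hnn.1 hnn.2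
      rw [Prod.mk.eta] at this
      rw [this, ← List.foldl_append, List.take_append_drop]

-- ===== VERDICT (by name: the statement is the Claim_ definition above) =====
theorem solution_spec : Claim_equal_solution := by
  intro sizes _ _
  unfold Spec_solution solution solution_alt
  rw [merge_dims_eq_fold sizes 0 0 le_rfl le_rfl]
  rfl
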